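-- pv_equiv track=rewrite | github.com/yingguqing/CMCC | common.py | bytesToWords
-- ===== SOURCE A (Python) =====
-- def bytesToWords(t):
--     e = []
--
--     count = len(t)
--     r = 0
--     for n in range(0, count):
--         i = r >> 5
--
--         if i >= len(e):
--             e.append(0)
--
--         e[i] |= t[n] << 24 - r % 32
--         r += 8
--     return e
-- ===== SOURCE B (Python) =====
-- def bytesToWords(t):
--     # Chunked packing: one 4-byte slice per output word, big-endian.
--     e = []
--     for i in range(0, len(t), 4):
--         word = 0
--         for j, b in enumerate(t[i:i + 4]):
--             word |= b << (24 - 8 * j)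
--         e.append(word)
--     return e
-- ===== Notes on version B (the rewrite author's own statement) =====
-- stated objective: simpler
-- what changed: Replaces A's flat per-byte loop with running bit offset, conditional zero-append and in-place OR into e[r>>5] by a recursive decomposition that slices off one 4-byte chunk per call and builds its word in a single enumerate pass.
import Mathlib
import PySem

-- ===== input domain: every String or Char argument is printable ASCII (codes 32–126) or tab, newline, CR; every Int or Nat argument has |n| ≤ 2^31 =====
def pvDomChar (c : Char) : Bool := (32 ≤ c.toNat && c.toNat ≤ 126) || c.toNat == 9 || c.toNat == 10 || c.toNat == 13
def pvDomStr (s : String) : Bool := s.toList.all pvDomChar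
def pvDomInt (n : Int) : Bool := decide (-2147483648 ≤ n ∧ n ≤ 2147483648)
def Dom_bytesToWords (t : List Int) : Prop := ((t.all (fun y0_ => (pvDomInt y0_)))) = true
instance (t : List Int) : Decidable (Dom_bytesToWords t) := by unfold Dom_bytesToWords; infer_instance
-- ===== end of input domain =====

-- B replaces A's flat per-byte scan (running bit offset, conditional append, in-place OR
-- into the last word) by a chunked loop: one 4-byte slice per output word; objective: simpler.


-- ===== PORT A =====
-- One step of A's loop body (state (e, r), current byte b = t[n]); the shift amounts
-- r >> 5 and 24 - r % 32 are always nonneg here, so Nat shifts are exact.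
def pvStepA (st : List Int × Int) (b : Int) : List Int × Int :=
  let e := st.1
  let r := st.2
  let i := r >>> (5 : Nat)
  let e' := if (e.length : Int) ≤ i then e ++ [0] else e
  let e'' := PySem.List.pySetD e' i
    (PySem.Int.bor (PySem.List.pyGetD e' i 0) (b <<< (24 - PySem.Int.mod r 32).toNat))
  (e'', r + 8)

def bytesToWords (t : List Int) : List Int :=
  ((PySem.List.pyRange 0 (t.length : Int) 1).foldl
    (fun st n => pvStepA st (PySem.List.pyGetD t n 0)) ([], 0)).1

-- ===== PORT B =====
-- Inner loop of B: word |= b << (24 - 8*j) over enumerate(chunk); j ≤ 3, shift nonneg, Nat shift exact.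
def pvPackWord (chunk : List Int) : Int :=
  (PySem.List.enumerate chunk).foldl
    (fun w jb => PySem.Int.bor w (jb.2 <<< (24 - 8 * jb.1).toNat)) 0

def bytesToWords_alt (t : List Int) : List Int :=
  (PySem.List.pyRange 0 (t.length : Int) 4).foldl
    (fun e i => e ++ [pvPackWord (PySem.List.slice t (some i) (some (i + 4)))]) []

-- ===== PRECONDITION & SPEC =====
def Spec_bytesToWords (t : List Int) (out : List Int) : Prop := out = bytesToWords_alt t
instance (t : List Int) (out : List Int) : Decidable (Spec_bytesToWords t out) := by unfold Spec_bytesToWords; infer_instance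

-- ===== CLAIM (what is proved, stated in full; the proofs are below) =====
def Claim_equal_bytesToWords : Prop := ∀ (t : List Int), Dom_bytesToWords t → Spec_bytesToWords t (bytesToWords t)

-- ===== LEMMAS AND PROOFS =====

-- proof-side reference: the word list, one 4-byte chunk at a time
def pvChunks : List Int → List Int
  | [] => []
  | x :: xs => pvPackWord ((x :: xs).take 4) :: pvChunks ((x :: xs).drop 4)
termination_by t => t.length
decreasing_by simp

theorem pvShiftR (m : Nat) (c : Int) (h0 : 0 ≤ c) (h : c < 32) :
    ((32 * (m : Int) + c) >>> (5 : Nat)) = (m : Int) := by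
  rw [Int.shiftRight_eq_div_pow]; omega

theorem pvMod32 (m : Nat) (c : Int) (h0 : 0 ≤ c) (h : c < 32) :
    PySem.Int.mod (32 * (m : Int) + c) 32 = c := by
  rw [PySem.Int.mod_eq_emod_of_pos (by omega : (0:Int) < 32)]; omega

theorem pvSetLast (e : List Int) (w v : Int) :
    PySem.List.pySetD (e ++ [w]) (e.length : Int) v = e ++ [v] := by
  simp [PySem.List.pySetD_natCast]

theorem pvGetLast (e : List Int) (w : Int) :
    PySem.List.pyGetD (e ++ [w]) (e.length : Int) 0 = w := by
  simp [PySem.List.pyGetD_natCast]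

-- step at a chunk start (r = 32*|e|): appends a fresh zero word and ORs in b<<24
theorem pvStep0 (e : List Int) (b : Int) :
    pvStepA (e, 32 * (e.length : Int)) b
      = (e ++ [PySem.Int.bor 0 (b <<< (24 : Nat))], 32 * (e.length : Int) + 8) := by
  simp only [pvStepA]
  rw [show (32 * (e.length : Int)) = 32 * (e.length : Int) + 0 by ring]
  rw [pvShiftR e.length 0 (by omega) (by omega), pvMod32 e.length 0 (by omega) (by omega)]
  simp only [le_refl, if_pos]
  rw [pvGetLast e 0, pvSetLast e 0]
  simp only [Prod.mk.injEq]
  exact ⟨rfl, by norm_num⟩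

-- step inside a chunk (r = 32*|e| + c, c ∈ {8,16,24}): ORs b << (24-c) into the last word
theorem pvStepC (e : List Int) (w b c : Int) (hc : c = 8 ∨ c = 16 ∨ c = 24) :
    pvStepA (e ++ [w], 32 * (e.length : Int) + c) b
      = (e ++ [PySem.Int.bor w (b <<< (24 - c).toNat)], 32 * (e.length : Int) + c + 8) := by
  simp only [pvStepA]
  rw [pvShiftR e.length c (by omega) (by omega), pvMod32 e.length c (by omega) (by omega)]
  have hlen : ¬ (((e ++ [w]).length : Int) ≤ (e.length : Int)) := by simp
  rw [if_neg hlen, pvGetLast e w, pvSetLast e w]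

theorem pvStep1 (e : List Int) (w b : Int) :
    pvStepA (e ++ [w], 32 * (e.length : Int) + 8) b
      = (e ++ [PySem.Int.bor w (b <<< (16 : Nat))], 32 * (e.length : Int) + 16) := by
  rw [pvStepC e w b 8 (by norm_num)]
  simp only [Prod.mk.injEq]
  exact ⟨rfl, by omega⟩

theorem pvStep2 (e : List Int) (w b : Int) :
    pvStepA (e ++ [w], 32 * (e.length : Int) + 16) b
      = (e ++ [PySem.Int.bor w (b <<< (8 : Nat))], 32 * (e.length : Int) + 24) := by
  rw [pvStepC e w b 16 (by norm_num)]
  simp only [Prod.mk.injEq]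
  exact ⟨rfl, by omega⟩

theorem pvStep3 (e : List Int) (w b : Int) :
    pvStepA (e ++ [w], 32 * (e.length : Int) + 24) b
      = (e ++ [PySem.Int.bor w (b <<< (0 : Nat))], 32 * (e.length : Int) + 32) := by
  rw [pvStepC e w b 24 (by norm_num)]
  simp only [Prod.mk.injEq]
  exact ⟨rfl, by omega⟩

-- A's loop, started at a chunk boundary, appends exactly the chunk words
theorem pvLoop (n : Nat) (t e : List Int) (hn : t.length ≤ n) :
    (t.foldl pvStepA (e, 32 * (e.length : Int))).1 = e ++ pvChunks t := by
  induction n generalizing t e with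
  | zero =>
    have : t = [] := by cases t <;> simp_all
    subst this; simp [pvChunks]
  | succ n ih =>
    match t with
    | [] => simp [pvChunks]
    | [b1] =>
      simp only [List.foldl, pvStep0]
      simp [pvChunks, pvPackWord, PySem.List.enumerate]
    | [b1, b2] =>
      simp only [List.foldl, pvStep0, pvStep1]
      simp [pvChunks, pvPackWord, PySem.List.enumerate]
    | [b1, b2, b3] =>
      simp only [List.foldl, pvStep0, pvStep1, pvStep2]
      simp [pvChunks, pvPackWord, PySem.List.enumerate]
    | b1 :: b2 :: b3 :: b4 :: rest =>
      have hrest : rest.length ≤ n := by simp at hn; omega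
      have h4 : ∀ w : Int,
          w = PySem.Int.bor (PySem.Int.bor (PySem.Int.bor (PySem.Int.bor 0 (b1 <<< (24 : Nat)))
                (b2 <<< (16 : Nat))) (b3 <<< (8 : Nat))) (b4 <<< (0 : Nat)) →
          (b1 :: b2 :: b3 :: b4 :: rest).foldl pvStepA (e, 32 * (e.length : Int))
            = rest.foldl pvStepA (e ++ [w], 32 * (((e ++ [w]).length : Int))) := by
        intro w hw
        simp only [List.foldl, pvStep0, pvStep1, pvStep2, pvStep3]
        subst hw
        congr 1
        simp
        ring
      rw [h4 _ rfl, ih rest _ hrest]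
      simp only [pvChunks, pvPackWord, PySem.List.enumerate, List.take, List.drop,
        List.foldl, List.append_assoc, List.cons_append, List.nil_append]
      norm_num [show Int.toNat 24 = 24 from rfl, show Int.toNat 16 = 16 from rfl,
        show Int.toNat 8 = 8 from rfl]

theorem pvRange4_nil (a b : Int) (h : b ≤ a) : PySem.List.pyRange a b 4 = [] := by
  rw [PySem.List.pyRange_of_pos a b (by norm_num)]
  rw [if_neg (not_lt.mpr h)]
  simp

theorem pvRange4_cons (a b : Int) (h : a < b) :
    PySem.List.pyRange a b 4 = a :: PySem.List.pyRange (a + 4) b 4 := by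
  rw [PySem.List.pyRange_of_pos a b (by norm_num),
      PySem.List.pyRange_of_pos (a + 4) b (by norm_num)]
  rw [if_pos h]
  by_cases h2 : a + 4 < b
  · rw [if_pos h2]
    have hn : ((b - a + 4 - 1) / 4).toNat = ((b - (a + 4) + 4 - 1) / 4).toNat + 1 := by omega
    rw [hn, List.range_succ_eq_map]
    simp only [List.map_cons, List.map_map]
    congr 1
    · norm_num
    · apply List.map_congr_left
      intro k _
      simp only [Function.comp_apply]
      push_cast
      ring
  · rw [if_neg h2]
    have hn : ((b - a + 4 - 1) / 4).toNat = 1 := by omega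
    rw [hn]
    simp

-- B's chunk loop, started at offset a, appends the chunk words of t.drop a
theorem pvAltLoop (n a : Nat) (t e : List Int) (hn : t.length ≤ a + 4 * n) :
    (PySem.List.pyRange (a : Int) (t.length : Int) 4).foldl
        (fun e i => e ++ [pvPackWord (PySem.List.slice t (some i) (some (i + 4)))]) e
      = e ++ pvChunks (t.drop a) := by
  induction n generalizing a e with
  | zero =>
    have hle : t.length ≤ a := by omega
    rw [pvRange4_nil _ _ (by exact_mod_cast hle)]
    rw [List.drop_eq_nil_of_le hle]
    simp [pvChunks]
  | succ n ih =>
    by_cases hab : a < t.length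
    · rw [pvRange4_cons _ _ (by exact_mod_cast hab)]
      simp only [List.foldl]
      rw [show ((a : Int) + 4) = ((a : Int) + ((4 : Nat) : Int)) by norm_num,
          PySem.List.slice_natCast_add]
      rw [show ((a : Int) + ((4 : Nat) : Int)) = (((a + 4 : Nat) : Int)) by push_cast; ring]
      rw [ih (a + 4) _ (by omega)]
      obtain ⟨x, xs, hx⟩ : ∃ x xs, t.drop a = x :: xs := by
        cases hd : t.drop a with
        | nil => rw [List.drop_eq_nil_iff] at hd; omega
        | cons x xs => exact ⟨x, xs, rfl⟩
      rw [show t.drop (a + 4) = (t.drop a).drop 4 by rw [List.drop_drop]]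
      rw [hx]
      simp [pvChunks]
    · rw [pvRange4_nil _ _ (by exact_mod_cast le_of_not_gt hab)]
      rw [List.drop_eq_nil_of_le (le_of_not_gt hab)]
      simp [pvChunks]

-- ===== VERDICT (by name: the statement is the Claim_ definition above) =====
theorem bytesToWords_spec : Claim_equal_bytesToWords := by
  intro t _
  unfold Spec_bytesToWords bytesToWords bytesToWords_alt
  rw [PySem.List.foldl_pyRange_zero_pyGetD' t 0 pvStepA ([], 0)]
  rw [show (0 : Int) = ((0 : Nat) : Int) from rfl, pvAltLoop t.length 0 t [] (by omega)]
  simpa using pvLoop t.length t [] (le_refl _)
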